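-- pv_equiv track=rewrite | github.com/carlos-adir/FEM-NURBS | femnurbs/SplineBaseFunction.py | compute_np
-- ===== SOURCE A (Python) =====
-- def compute_np(U):
--     """
--
--     We have that U = [0, ..., 0, ?, ..., ?, 1, ..., 1]
--     And that U[p] = 0, but U[p+1] != 0
--     The same way, U[n] = 1, but U[n-1] != 0
--
--     Using that, we know that
--         len(U) = m + 1 = n + p + 1
--     That means that
--         m = n + p
--
--     """
--     m = len(U) - 1
--     p = -1
--     while U[p + 1] == 0 and U[m - (p + 1)] == 1:
--         p += 1
--     if U[p + 1] == 0 or U[m - (p + 1)] == 1: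
--         msg = "The vector U is not valid. Problem while calculing p"
--         raise Exception(msg)
--     n = m - p
--     return n, p
--     pass
-- ===== SOURCE B (Python) =====
-- def compute_np(U):
--     a = 0
--     while a < len(U) and U[a] == 0:
--         a += 1
--     b = 0
--     while b < len(U) and U[len(U) - 1 - b] == 1:
--         b += 1
--     if a != b:
--         raise Exception("The vector U is not valid. Problem while calculing p")
--     p = a - 1
--     n = (len(U) - 1) - p
--     return n, p
-- ===== Notes on version B (the rewrite author's own statement) =====
-- stated objective: simpler
-- what changed: Replaces A's single interleaved two-pointer while-loop (advancing p while the front is 0 AND the mirrored back is 1, then a combined or-check) with two independent bounded counting scans -- leading zeros from the front, trailing ones from the back -- followed by a plain equality test a == b.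
import Mathlib
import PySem

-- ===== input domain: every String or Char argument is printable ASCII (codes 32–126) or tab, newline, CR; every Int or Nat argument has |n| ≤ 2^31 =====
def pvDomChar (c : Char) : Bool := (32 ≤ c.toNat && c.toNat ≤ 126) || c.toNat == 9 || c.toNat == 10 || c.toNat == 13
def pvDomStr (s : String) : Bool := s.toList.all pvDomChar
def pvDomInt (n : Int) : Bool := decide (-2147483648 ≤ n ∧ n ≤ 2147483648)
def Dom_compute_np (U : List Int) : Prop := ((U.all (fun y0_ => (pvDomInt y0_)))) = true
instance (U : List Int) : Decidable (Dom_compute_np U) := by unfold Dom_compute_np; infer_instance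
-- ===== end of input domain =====

-- B replaces A's interleaved two-pointer while-loop by two independent counting scans
-- plus an equality test (objective: simpler); agreement is proved wherever A returns.

-- ===== PORT A =====
-- A's while loop: p advances while U[p+1] == 0 and U[m-(p+1)] == 1.  Fuel-bounded
-- recursion over the same state; an out-of-range access (Python IndexError) stops with
-- the current p (those inputs lie outside Pre_).
def computeNpLoopA (U : List Int) (m : Int) : Nat → Int → Int
  | 0, p => p
  | fuel + 1, p =>
    match PySem.List.pyGet? U (p + 1), PySem.List.pyGet? U (m - (p + 1)) with
    | some x, some y => if x == 0 && y == 1 then computeNpLoopA U m fuel (p + 1) else p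
    | _, _ => p

def compute_np (U : List Int) : List Int :=
  let m : Int := (U.length : Int) - 1
  let p := computeNpLoopA U m (U.length + 1) (-1)
  match PySem.List.pyGet? U (p + 1), PySem.List.pyGet? U (m - (p + 1)) with
  | some x, some y => if x == 0 || y == 1 then [] else [m - p, p]  -- [] = raise Exception
  | _, _ => []  -- IndexError

-- ===== PORT B =====
-- Source B's first scan: count leading zeros from the front.
def computeNpLeadZeros : List Int → Int
  | [] => 0
  | x :: xs => if x == 0 then 1 + computeNpLeadZeros xs else 0

-- Source B's second scan: count trailing ones from the back (= leading ones of the reverse).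
def computeNpLeadOnes : List Int → Int
  | [] => 0
  | x :: xs => if x == 1 then 1 + computeNpLeadOnes xs else 0

def compute_np_alt (U : List Int) : List Int :=
  let a := computeNpLeadZeros U
  let b := computeNpLeadOnes U.reverse
  if a ≠ b then []  -- raise Exception
  else
    let p := a - 1
    [(U.length : Int) - 1 - p, p]

-- ===== PRECONDITION & SPEC =====
-- Pre_ is exactly the set of inputs on which the Python A returns normally: U nonempty
-- (A indexes U[0] unconditionally, IndexError on []) and the leading-zero count equals
-- the trailing-one count (otherwise A raises its Exception).
def Pre_compute_np (U : List Int) : Prop :=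
  U ≠ [] ∧ (U.takeWhile (· == 0)).length = (U.reverse.takeWhile (· == 1)).length
instance (U : List Int) : Decidable (Pre_compute_np U) := by unfold Pre_compute_np; infer_instance

def pvWitness_compute_np : List Int := [0, 0, 5, 1, 1]

def Spec_compute_np (U : List Int) (out : List Int) : Prop := out = compute_np_alt U
instance (U : List Int) (out : List Int) : Decidable (Spec_compute_np U out) := by unfold Spec_compute_np; infer_instance

-- ===== CLAIM (what is proved, stated in full; the proofs are below) =====
def Claim_equal_compute_np : Prop := ∀ (U : List Int), Dom_compute_np U → Pre_compute_np U → Spec_compute_np U (compute_np U)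

-- ===== LEMMAS AND PROOFS =====

-- Every position strictly before the takeWhile break satisfies the predicate.
theorem pv_tw_lt (p : Int → Bool) :
    ∀ (U : List Int) (i : Nat), i < (U.takeWhile p).length → ∃ x, U[i]? = some x ∧ p x = true := by
  intro U
  induction U with
  | nil => intro i hi; simp at hi
  | cons x xs ih =>
    intro i hi
    rw [List.takeWhile_cons] at hi
    by_cases hpx : p x = true
    · simp [hpx] at hi
      cases i with
      | zero => exact ⟨x, by simp, hpx⟩
      | succ n =>
        obtain ⟨y, hy, hpy⟩ := ih n (by omega)
        exact ⟨y, by simpa using hy, hpy⟩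
    · simp [hpx] at hi

-- The element at the break position (when it exists) falsifies the predicate.
theorem pv_tw_stop (p : Int → Bool) :
    ∀ (U : List Int), (U.takeWhile p).length < U.length →
      ∃ x, U[(U.takeWhile p).length]? = some x ∧ p x = false := by
  intro U
  induction U with
  | nil => intro h; simp at h
  | cons x xs ih =>
    intro h
    by_cases hpx : p x = true
    · rw [List.takeWhile_cons, if_pos hpx] at h ⊢
      simp only [List.length_cons] at h ⊢
      obtain ⟨y, hy, hpy⟩ := ih (by omega)
      exact ⟨y, by simpa using hy, hpy⟩
    · rw [List.takeWhile_cons, if_neg hpx]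
      exact ⟨x, by simp, by simpa using hpx⟩

theorem pv_leadZeros_eq : ∀ (U : List Int),
    computeNpLeadZeros U = ((U.takeWhile (· == 0)).length : Int) := by
  intro U
  induction U with
  | nil => simp [computeNpLeadZeros]
  | cons x xs ih =>
    rw [computeNpLeadZeros, List.takeWhile_cons]
    by_cases hx : (x == 0) = true
    · simp [hx, ih]; omega
    · simp [hx]

theorem pv_leadOnes_eq : ∀ (V : List Int),
    computeNpLeadOnes V = ((V.takeWhile (· == 1)).length : Int) := by
  intro V
  induction V with
  | nil => simp [computeNpLeadOnes]
  | cons x xs ih =>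
    rw [computeNpLeadOnes, List.takeWhile_cons]
    by_cases hx : (x == 1) = true
    · simp [hx, ih]; omega
    · simp [hx]

-- The leading-zero block and the trailing-one block cannot overlap.
theorem pv_no_overlap (U : List Int)
    (h : (U.takeWhile (· == 0)).length + (U.reverse.takeWhile (· == 1)).length > U.length) :
    False := by
  set a := (U.takeWhile (· == 0)).length with ha
  set b := (U.reverse.takeWhile (· == 1)).length with hb
  have halen : a ≤ U.length := (U.takeWhile_sublist _).length_le
  have hblen : b ≤ U.length := by
    have := (U.reverse.takeWhile_sublist (· == 1)).length_le
    simpa using this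
  have hapos : 0 < a := by omega
  obtain ⟨x, hx, hx0⟩ := pv_tw_lt (· == 0) U (a - 1) (by omega)
  have hj : U.length - a < b := by omega
  obtain ⟨y, hy, hy1⟩ := pv_tw_lt (· == 1) U.reverse (U.length - a) (by omega)
  rw [List.getElem?_reverse (by omega)] at hy
  have hidx : U.length - 1 - (U.length - a) = a - 1 := by omega
  rw [hidx] at hy
  rw [hx] at hy
  have hx0' : x = 0 := by simpa using hx0
  have hy1' : y = 1 := by simpa using hy1
  simp [hx0', hy1'] at hy

-- Characterisation of A's while-loop under the Pre_ invariants.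
theorem pv_loopA_eq (U : List Int) (a : Nat)
    (ha : ∀ i, i < a → U[i]? = some 0)
    (hb : ∀ i, i < a → U[U.length - 1 - i]? = some 1)
    (hlt : a < U.length)
    (hstop : ∃ x, U[a]? = some x ∧ x ≠ 0) :
    ∀ (fuel k : Nat), k ≤ a → a - k < fuel →
      computeNpLoopA U ((U.length : Int) - 1) fuel ((k : Int) - 1) = (a : Int) - 1 := by
  intro fuel
  induction fuel with
  | zero => intro k _ hf; omega
  | succ n ih =>
    intro k hk hf
    rw [computeNpLoopA]
    have e1 : (k : Int) - 1 + 1 = ((k : Nat) : Int) := by ring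
    rw [e1]
    have e2 : (U.length : Int) - 1 - ((k : Nat) : Int) = ((U.length - 1 - k : Nat) : Int) := by
      omega
    rw [e2, PySem.List.pyGet?_natCast, PySem.List.pyGet?_natCast]
    by_cases hka : k < a
    · rw [ha k hka, hb k hka]
      simp only [beq_self_eq_true, Bool.and_self, if_true]
      have : ((k : Nat) : Int) = ((k + 1 : Nat) : Int) - 1 := by push_cast; ring
      rw [this]
      exact ih (k + 1) (by omega) (by omega)
    · have hke : k = a := by omega
      obtain ⟨x, hx, hxne⟩ := hstop
      subst hke
      rw [hx]
      have hy : ∃ y, U[U.length - 1 - k]? = some y := by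
        have : U.length - 1 - k < U.length := by omega
        exact ⟨U[U.length - 1 - k], List.getElem?_eq_getElem this⟩
      obtain ⟨y, hy⟩ := hy
      rw [hy]
      have hx0 : (x == 0) = false := by simpa using hxne
      simp [hx0]

-- ===== VERDICT =====
theorem compute_np_spec : Claim_equal_compute_np := by
  intro U _ hpre
  obtain ⟨hne, hab⟩ := hpre
  unfold Spec_compute_np
  set a := (U.takeWhile (· == 0)).length with hadef
  set b := (U.reverse.takeWhile (· == 1)).length with hbdef
  have hpos : 0 < U.length := List.length_pos_iff.mpr hne
  have hsum : a + b ≤ U.length := by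
    by_contra hcon
    exact pv_no_overlap U (by omega)
  have halt : a < U.length := by omega
  have hblt : b < U.length := by omega
  -- invariants feeding the loop characterisation
  have ha : ∀ i, i < a → U[i]? = some 0 := by
    intro i hi
    obtain ⟨x, hx, hx0⟩ := pv_tw_lt (· == 0) U i hi
    have : x = 0 := by simpa using hx0
    rw [this] at hx; exact hx
  have hb : ∀ i, i < a → U[U.length - 1 - i]? = some 1 := by
    intro i hi
    obtain ⟨y, hy, hy1⟩ := pv_tw_lt (· == 1) U.reverse i (by omega)
    rw [List.getElem?_reverse (by omega)] at hy
    have : y = 1 := by simpa using hy1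
    rw [this] at hy; exact hy
  have hstopA : ∃ x, U[a]? = some x ∧ x ≠ 0 := by
    obtain ⟨x, hx, hx0⟩ := pv_tw_stop (· == 0) U halt
    exact ⟨x, hx, by simpa using hx0⟩
  have hstopB : ∃ y, U[U.length - 1 - a]? = some y ∧ y ≠ 1 := by
    obtain ⟨y, hy, hy1⟩ := pv_tw_stop (· == 1) U.reverse (by simpa using hblt)
    rw [List.getElem?_reverse (by simpa using hblt)] at hy
    rw [← hbdef] at hy
    have hidx : U.length - 1 - b = U.length - 1 - a := by omega
    rw [hidx] at hy
    exact ⟨y, hy, by simpa using hy1⟩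
  obtain ⟨x, hx, hxne⟩ := hstopA
  obtain ⟨y, hy, hyne⟩ := hstopB
  -- evaluate port A
  have hloop : computeNpLoopA U ((U.length : Int) - 1) (U.length + 1) (((0 : Nat) : Int) - 1)
      = (a : Int) - 1 :=
    pv_loopA_eq U a ha hb halt ⟨x, hx, hxne⟩ (U.length + 1) 0 (by omega) (by omega)
  have hA : compute_np U = [(U.length : Int) - 1 - ((a : Int) - 1), (a : Int) - 1] := by
    unfold compute_np
    simp only []
    have h0 : ((-1 : Int)) = ((0 : Nat) : Int) - 1 := by norm_num
    rw [h0, hloop]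
    have e1 : (a : Int) - 1 + 1 = ((a : Nat) : Int) := by ring
    rw [e1]
    have e2 : (U.length : Int) - 1 - ((a : Nat) : Int) = ((U.length - 1 - a : Nat) : Int) := by
      omega
    rw [e2, PySem.List.pyGet?_natCast, PySem.List.pyGet?_natCast, hx, hy]
    have hx0 : (x == 0) = false := by simpa using hxne
    have hy1 : (y == 1) = false := by simpa using hyne
    simp [hx0, hy1]
  -- evaluate port B
  have hB : compute_np_alt U = [(U.length : Int) - 1 - ((a : Int) - 1), (a : Int) - 1] := by
    unfold compute_np_alt
    rw [pv_leadZeros_eq, pv_leadOnes_eq, ← hadef, ← hbdef, hab]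
    simp
  rw [hA, hB]
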